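-- pv_equiv track=rewrite | github.com/ALizarazoTellez/Algorithms | Projects/Anki-Decks-Generator/mining.py | simplify_word
-- ===== SOURCE A (Python) =====
-- def simplify_word(word: str) -> str:
--     """Return a word without punctuation signs."""
--
--     PUNCTUATION = {
--         '.',
--         ',',
--         '"',
--         # The character `'` is used for contractions in the English language.
--         # "'",
--         '¿', '?',
--         '¡', '!',
--     }
--
--     for punctuation in PUNCTUATION:
--         word = word.replace(punctuation, '', 1)
--
--     return word
-- ===== SOURCE B (Python) =====
-- def simplify_word(word: str) -> str:
--     """Return a word without punctuation signs."""
--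
--     PUNCTUATION = {
--         '.',
--         ',',
--         '"',
--         # The character `'` is used for contractions in the English language.
--         # "'",
--         '¿', '?',
--         '¡', '!',
--     }
--
--     removed = set()
--     out = []
--     for ch in word:
--         if ch in PUNCTUATION and ch not in removed:
--             removed.add(ch)
--         else:
--             out.append(ch)
--     return ''.join(out)
-- ===== Notes on version B (the rewrite author's own statement) =====
-- stated objective: alternative
-- what changed: B replaces A's seven per-punctuation remove-first-occurrence scans of the word with a single left-to-right pass that keeps a seen-set of already-dropped punctuation chars and skips only the first occurrence of each.
import Mathlib
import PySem

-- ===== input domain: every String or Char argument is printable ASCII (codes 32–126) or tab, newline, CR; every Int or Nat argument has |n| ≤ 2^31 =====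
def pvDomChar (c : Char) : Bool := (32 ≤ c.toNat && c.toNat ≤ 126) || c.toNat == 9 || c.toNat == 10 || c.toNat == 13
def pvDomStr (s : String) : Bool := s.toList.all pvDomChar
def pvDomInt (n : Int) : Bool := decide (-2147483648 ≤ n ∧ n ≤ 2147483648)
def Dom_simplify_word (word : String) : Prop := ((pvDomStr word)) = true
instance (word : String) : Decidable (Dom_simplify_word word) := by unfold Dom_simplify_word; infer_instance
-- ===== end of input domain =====

-- B: a single left-to-right pass with a seen-set instead of A's seven remove-first-occurrence scans; same result.
-- (A iterates over a Python set; the result is independent of that iteration order, which the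
-- equivalence proof below confirms, so port A with a fixed literal order.)

-- ===== PORT A =====
-- the PUNCTUATION set (the apostrophe is commented out in A and stays excluded)
def pvPunct : List Char := ['.', ',', '"', '¿', '?', '¡', '!']

-- word.replace(p, '', 1) for a single char p = remove the first occurrence (exact, ported by hand)
def pvRemoveFirst (c : Char) : List Char → List Char
  | [] => []
  | x :: xs => if x = c then xs else x :: pvRemoveFirst c xs

def simplify_word (word : String) : String :=
  String.ofList (pvPunct.foldl (fun w c => pvRemoveFirst c w) word.toList)

-- ===== PORT B =====
def pvGo (seen : PySem.Set Char) : List Char → List Char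
  | [] => []
  | c :: cs =>
    if pvPunct.contains c && !(PySem.Set.contains seen c) then
      pvGo (PySem.Set.add seen c) cs
    else
      c :: pvGo seen cs

def simplify_word_alt (word : String) : String :=
  String.ofList (pvGo PySem.Set.empty word.toList)

-- ===== PRECONDITION & SPEC =====
def Spec_simplify_word (word : String) (out : String) : Prop := out = simplify_word_alt word
instance (word : String) (out : String) : Decidable (Spec_simplify_word word out) := by unfold Spec_simplify_word; infer_instance

-- ===== CLAIM (what is proved, stated in full; the proofs are below) =====
def Claim_equal_simplify_word : Prop := ∀ (word : String), Dom_simplify_word word → Spec_simplify_word word (simplify_word word)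

-- ===== LEMMAS AND PROOFS =====

-- A's fold over a list Q of punctuation chars, as a function of the word
def pvF (Q : List Char) (l : List Char) : List Char :=
  Q.foldl (fun w c => pvRemoveFirst c w) l

theorem pvF_nil (Q : List Char) : pvF Q [] = [] := by
  induction Q with
  | nil => rfl
  | cons c Q ih => simpa [pvF, pvRemoveFirst, List.foldl] using ih

theorem pvF_cons_notmem {a : Char} {Q : List Char} (h : a ∉ Q) (l : List Char) :
    pvF Q (a :: l) = a :: pvF Q l := by
  induction Q generalizing l with
  | nil => rfl
  | cons c Q ih =>
    have hca : ¬ (a = c) := fun he => h (he ▸ List.mem_cons_self)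
    have h' : a ∉ Q := fun hm => h (List.mem_cons_of_mem _ hm)
    simp [pvF, List.foldl, pvRemoveFirst, hca] at *
    exact ih h' _

theorem pvF_cons_mem {a : Char} {Q : List Char} (h : a ∈ Q) (l : List Char) :
    pvF Q (a :: l) = pvF (Q.erase a) l := by
  induction Q generalizing l with
  | nil => cases h
  | cons c Q ih =>
    by_cases hca : c = a
    · subst hca
      simp [pvF, List.foldl, pvRemoveFirst, List.erase_cons_head]
    · have h' : a ∈ Q := by
        rcases List.mem_cons.mp h with h1 | h1
        · exact absurd h1.symm hca
        · exact h1
      have hac : ¬ (a = c) := fun he => hca he.symm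
      rw [List.erase_cons_tail (by simpa using hca)]
      simp only [pvF, List.foldl, pvRemoveFirst, if_neg hac]
      exact ih h' _

theorem pvGo_eq_pvF (l : List Char) :
    ∀ (Q seen : List Char), Q.Nodup → (∀ c, c ∈ Q ↔ c ∈ pvPunct ∧ c ∉ seen) →
      pvGo seen l = pvF Q l := by
  induction l with
  | nil => intro Q seen _ _; simp [pvGo, pvF_nil]
  | cons a l ih =>
    intro Q seen hnd hinv
    by_cases hc : a ∈ pvPunct ∧ a ∉ seen
    · have haQ : a ∈ Q := (hinv a).mpr hc
      have hb : (pvPunct.contains a && !(PySem.Set.contains seen a)) = true := by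
        simp [PySem.Set.contains, hc.1, hc.2]
      rw [pvGo, if_pos hb, pvF_cons_mem haQ]
      apply ih (Q.erase a) (PySem.Set.add seen a) (hnd.erase a)
      intro c
      rw [List.Nodup.mem_erase_iff hnd, hinv c]
      have hadd : c ∈ PySem.Set.add seen a ↔ c ∈ seen ∨ c = a := PySem.Set.mem_add ..
      constructor
      · rintro ⟨hne, hp, hs⟩
        exact ⟨hp, fun hm => (hadd.mp hm).elim hs hne⟩
      · rintro ⟨hp, hs⟩
        exact ⟨fun he => hs (hadd.mpr (Or.inr he)), hp, fun hm => hs (hadd.mpr (Or.inl hm))⟩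
    · have haQ : a ∉ Q := fun hm => hc ((hinv a).mp hm)
      have hb : ¬ ((pvPunct.contains a && !(PySem.Set.contains seen a)) = true) := by
        simp only [PySem.Set.contains, Bool.and_eq_true, List.contains_eq_mem,
          Bool.not_eq_true', decide_eq_false_iff_not, decide_eq_true_eq]
        tauto
      rw [pvGo, if_neg hb, pvF_cons_notmem haQ]
      rw [ih Q seen hnd hinv]

-- ===== VERDICT (by name: the statement is the Claim_ definition above) =====
theorem simplify_word_spec : Claim_equal_simplify_word := by
  intro word _
  unfold Spec_simplify_word simplify_word simplify_word_alt
  rw [pvGo_eq_pvF word.toList pvPunct PySem.Set.empty (by decide)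
    (by intro c; simp [PySem.Set.empty])]
  rfl
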